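-- pv_equiv track=rewrite | github.com/Maru-Ben/HEARTS | scripts/starmie/sdd/preprocessor.py | frequentSample
-- ===== SOURCE A (Python) =====
-- import collections
--
-- def frequentSample(colVals, max_tokens):
--     '''Frequent sampling: most frequent tokens'''
--     tokens = []
--     tokenFreq = collections.Counter(colVals)
--     # Break ties by lex order for stability
--     tokenFreq_items = sorted(tokenFreq.items(), key=lambda x: (-x[1], x[0]))
--     tokenFreq = dict(tokenFreq_items[:max_tokens])
--     for t in colVals:
--         if t in tokenFreq and t not in tokens:
--             tokens.append(t)
--     return tokens
-- ===== SOURCE B (Python) =====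
-- import collections
--
-- def frequentSample(colVals, max_tokens):
--     '''Frequent sampling: most frequent tokens'''
--     first = {}
--     for i, t in enumerate(colVals):
--         if t not in first:
--             first[t] = i
--     top = sorted(collections.Counter(colVals).items(), key=lambda x: (-x[1], x[0]))[:max_tokens]
--     return sorted((t for t, _ in top), key=lambda t: first[t])
-- ===== Notes on version B (the rewrite author's own statement) =====
-- stated objective: faster
-- what changed: B replaces A's second full scan of colVals with its 't not in tokens' list-membership dedup loop (O(n*k)) by a one-pass first-appearance-index dict built up front, and produces the result by sorting the selected top tokens by that stored index.
import Mathlib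
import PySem

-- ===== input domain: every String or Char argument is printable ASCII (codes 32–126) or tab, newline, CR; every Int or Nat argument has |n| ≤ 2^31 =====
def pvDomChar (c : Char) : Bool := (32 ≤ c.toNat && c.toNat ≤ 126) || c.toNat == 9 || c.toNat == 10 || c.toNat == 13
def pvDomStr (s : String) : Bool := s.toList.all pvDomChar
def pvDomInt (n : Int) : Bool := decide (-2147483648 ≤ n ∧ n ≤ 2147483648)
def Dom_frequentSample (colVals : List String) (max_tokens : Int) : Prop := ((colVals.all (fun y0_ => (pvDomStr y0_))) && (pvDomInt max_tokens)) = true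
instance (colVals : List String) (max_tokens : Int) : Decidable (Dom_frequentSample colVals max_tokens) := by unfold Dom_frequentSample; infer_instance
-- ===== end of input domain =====

-- B replaces A's rescanning loop with its linear 't not in tokens' test by a one-pass first-appearance-index dict and a final sort of the selected tokens by that index (objective: faster, measured).

-- ===== PORT A =====
def frequentSample (colVals : List String) (max_tokens : Int) : List String :=
  let tokenFreq := PySem.Dict.counter colVals
  let tokenFreq_items := PySem.List.sorted2 tokenFreq.items (fun x => -x.2) (fun x => x.1)
  let tokenFreq2 : PySem.Dict String Int := PySem.Dict.ofList (PySem.List.slice tokenFreq_items none (some max_tokens))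
  colVals.foldl (fun tokens t =>
    if tokenFreq2.contains t && !(tokens.contains t) then tokens ++ [t] else tokens) []

-- ===== PORT B =====
def frequentSample_alt (colVals : List String) (max_tokens : Int) : List String :=
  let first : PySem.Dict String Int := (PySem.List.enumerate colVals 0).foldl
    (fun d it => if d.contains it.2 then d else d.insert it.2 it.1) PySem.Dict.empty
  let top := PySem.List.slice
    (PySem.List.sorted2 (PySem.Dict.counter colVals).items (fun x => -x.2) (fun x => x.1))
    none (some max_tokens)
  PySem.List.sorted (top.map (fun p => p.1)) (fun t => first.getD t 0)

-- ===== PRECONDITION & SPEC =====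
def Spec_frequentSample (colVals : List String) (max_tokens : Int) (out : List String) : Prop := out = frequentSample_alt colVals max_tokens
instance (colVals : List String) (max_tokens : Int) (out : List String) : Decidable (Spec_frequentSample colVals max_tokens out) := by unfold Spec_frequentSample; infer_instance

-- ===== CLAIM (what is proved, stated in full; the proofs are below) =====
def Claim_equal_frequentSample : Prop := ∀ (colVals : List String) (max_tokens : Int), Dom_frequentSample colVals max_tokens → Spec_frequentSample colVals max_tokens (frequentSample colVals max_tokens)

-- ===== LEMMAS AND PROOFS =====

-- dedup in cons form
theorem dedup_cons (x : String) (xs : List String) :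
    PySem.List.dedup (x :: xs) = x :: (PySem.List.dedup xs).filter (fun u => !(u == x)) := by
  have h := PySem.Set.update_eq_append_filter [x] xs
  rw [PySem.List.dedup, PySem.List.dedup, PySem.Set.ofList_cons_eq_update, h]
  simp only [List.singleton_append, List.cons.injEq, true_and]
  apply List.filter_congr
  intro u _
  by_cases hux : u = x
  · simp [hux, PySem.Set.contains]
  · simp [hux, PySem.Set.contains]

-- A's accumulator loop in closed form: the first occurrences (in order) of the selected tokens
theorem loopA_eq (sel : PySem.Dict String Int) : ∀ (xs : List String) (acc : List String),
    xs.foldl (fun tokens t => if sel.contains t && !(tokens.contains t) then tokens ++ [t] else tokens) acc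
      = acc ++ (PySem.List.dedup xs).filter (fun t => sel.contains t && !(acc.contains t)) := by
  intro xs
  induction xs with
  | nil => intro acc; simp [PySem.List.dedup, PySem.Set.ofList]
  | cons x xs ih =>
    intro acc
    rw [List.foldl_cons, dedup_cons, List.filter_cons, List.filter_filter]
    by_cases hs : sel.contains x = true
    · by_cases ha : acc.contains x = true
      · have hax : x ∈ acc := by simpa using ha
        rw [if_neg (by simp [hs, hax]), if_neg (by simp [hs, hax]), ih]
        congr 1
        apply List.filter_congr
        intro u _
        by_cases hux : u = x
        · simp [hux, hax]
        · simp [hux]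
      · have hax : x ∉ acc := by simpa using ha
        rw [if_pos (by simp [hs, hax]), if_pos (by simp [hs, hax]), ih]
        conv_rhs => rw [List.append_cons]
        congr 1
        apply List.filter_congr
        intro u _
        by_cases hux : u = x
        · simp [hux]
        · simp [hux, List.contains_eq_mem, List.mem_append, Bool.and_comm]
    · have hs' : sel.contains x = false := by simpa using hs
      rw [if_neg (by simp [hs']), if_neg (by simp [hs']), ih]
      congr 1
      apply List.filter_congr
      intro u _
      by_cases hux : u = x
      · simp [hux, hs']
      · simp [hux]

-- positions of dedup's elements are their (strictly increasing) first-occurrence indices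
theorem dedup_pairwise_idxOf (xs : List String) :
    (PySem.List.dedup xs).Pairwise (fun a b => xs.idxOf a < xs.idxOf b) := by
  induction xs with
  | nil => simp [PySem.List.dedup, PySem.Set.ofList]
  | cons x xs ih =>
    rw [dedup_cons]
    constructor
    · intro b hb
      have hbx : b ≠ x := by
        have := (List.mem_filter.mp hb).2; simpa using this
      rw [List.idxOf_cons_self, List.idxOf_cons_ne _ (fun h => hbx h.symm)]
      omega
    · have hp := ih.sublist (List.filter_sublist (p := fun u => !(u == x)) (l := PySem.List.dedup xs))
      apply hp.imp_of_mem
      intro a b ha hb hlt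
      have hax : a ≠ x := by have := (List.mem_filter.mp ha).2; simpa using this
      have hbx : b ≠ x := by have := (List.mem_filter.mp hb).2; simpa using this
      rw [List.idxOf_cons_ne _ (fun h => hax h.symm), List.idxOf_cons_ne _ (fun h => hbx h.symm)]
      omega

-- once a key is in the first-appearance dict, the rest of the fold never touches it
theorem first_frozen (t : String) : ∀ (xs : List String) (s : Int) (d : PySem.Dict String Int),
    d.contains t = true →
    ((PySem.List.enumerate xs s).foldl
      (fun d it => if d.contains it.2 then d else d.insert it.2 it.1) d).get? t = d.get? t := by
  intro xs
  induction xs with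
  | nil => intro s d _; simp [PySem.List.enumerate_nil]
  | cons x xs ih =>
    intro s d hd
    rw [PySem.List.enumerate_cons, List.foldl_cons]
    by_cases hx : d.contains x = true
    · rw [if_pos hx]; exact ih (s+1) d hd
    · have hxt : t ≠ x := fun h => hx (h ▸ hd)
      rw [if_neg hx]
      rw [ih (s+1) _ (by rw [PySem.Dict.contains_insert]; simp [hd])]
      exact PySem.Dict.get?_insert_of_ne d s hxt

-- B's first-appearance dict holds each seen token's first index (offset by the start)
theorem first_idx (t : String) : ∀ (xs : List String) (s : Int) (d : PySem.Dict String Int),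
    d.contains t = false → t ∈ xs →
    ((PySem.List.enumerate xs s).foldl
      (fun d it => if d.contains it.2 then d else d.insert it.2 it.1) d).get? t
      = some (s + (xs.idxOf t : Int)) := by
  intro xs
  induction xs with
  | nil => intro s d _ h; simp at h
  | cons x xs ih =>
    intro s d hd hm
    rw [PySem.List.enumerate_cons, List.foldl_cons]
    by_cases hxt : x = t
    · subst hxt
      rw [if_neg (by simp [hd])]
      rw [first_frozen x xs (s+1) _ (PySem.Dict.contains_insert_self d x s)]
      rw [PySem.Dict.get?_insert_self, List.idxOf_cons_self]
      simp
    · have hm' : t ∈ xs := by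
        rcases List.mem_cons.mp hm with h | h
        · exact absurd h.symm hxt
        · exact h
      have hidx : (x :: xs).idxOf t = xs.idxOf t + 1 := List.idxOf_cons_ne _ hxt
      by_cases hx : d.contains x = true
      · rw [if_pos hx, ih (s+1) d hd hm', hidx]
        congr 1
        push_cast
        ring
      · rw [if_neg hx]
        have hd' : (d.insert x s).contains t = false := by
          rw [PySem.Dict.contains_insert]
          simp only [hd, Bool.or_false]
          simpa using fun h : t = x => hxt h.symm
        rw [ih (s+1) _ hd' hm', hidx]
        congr 1
        push_cast
        ring

-- a prefix slice is a sublist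
theorem slice_to_sublist {α : Type} (xs : List α) (b : Int) :
    (PySem.List.slice xs none (some b)).Sublist xs := by
  by_cases h : 0 ≤ b
  · rw [PySem.List.slice_to xs h]; exact List.take_sublist _ _
  · have hk0 : (0:Nat) < (-b).toNat := by omega
    have hk : b = -(((-b).toNat : Nat) : Int) := by omega
    rw [hk, PySem.List.slice_to_neg_natCast xs ((-b).toNat) hk0]
    exact List.take_sublist _ _

-- keys of a dict built from an association list, in order
theorem keys_ofList (l : List (String × Int)) :
    (PySem.Dict.ofList l).keys = PySem.Set.ofList (l.map (fun p => p.1)) := by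
  have h := PySem.Dict.keys_foldl_insert_key (ν := Int) l (fun p => p.1) (fun _ p => p.2) PySem.Dict.empty
  rw [PySem.Dict.ofList, PySem.Dict.update, h]
  rw [show (PySem.Dict.empty : PySem.Dict String Int).keys = [] from rfl]
  rfl

-- ===== VERDICT (by name: the statement is the Claim_ definition above) =====
theorem frequentSample_spec : Claim_equal_frequentSample := by
  intro colVals max_tokens _
  unfold Spec_frequentSample frequentSample frequentSample_alt
  dsimp only
  set items := (PySem.Dict.counter colVals).items with hitems
  set srt := PySem.List.sorted2 items (fun x => -x.2) (fun x => x.1) with hsrt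
  set top := PySem.List.slice srt none (some max_tokens) with htop
  set sel : PySem.Dict String Int := PySem.Dict.ofList top with hsel
  set firstD : PySem.Dict String Int := (PySem.List.enumerate colVals 0).foldl
    (fun d it => if d.contains it.2 then d else d.insert it.2 it.1) PySem.Dict.empty with hfirst
  set selKeys := top.map (fun p => p.1) with hselKeys
  -- membership in sel = membership in selKeys
  have hmemsel : ∀ t, sel.contains t = true ↔ t ∈ selKeys := by
    intro t
    rw [PySem.Dict.contains_iff_mem_keys, hsel, keys_ofList, PySem.Set.mem_ofList]
  -- selKeys is a sublist of the sorted keys, which are a permutation of dedup colVals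
  have hmapperm : (srt.map (fun p => p.1)).Perm (PySem.List.dedup colVals) := by
    have h1 : (srt.map (fun p => p.1)).Perm (items.map (fun p => p.1)) :=
      (PySem.List.sorted2_perm items _ _ false).map _
    have h2 : items.map (fun p => p.1) = PySem.List.dedup colVals := by
      rw [hitems, PySem.Dict.items_counter, List.map_map]
      simp [PySem.List.dedup, Function.comp_def]
    rw [h2] at h1; exact h1
  have hselsub : selKeys.Sublist (srt.map (fun p => p.1)) :=
    (slice_to_sublist srt max_tokens).map _
  have hselnodup : selKeys.Nodup :=
    ((hmapperm.nodup_iff).mpr (PySem.List.nodup_dedup colVals)).sublist hselsub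
  have hselmem : ∀ t ∈ selKeys, t ∈ colVals := by
    intro t ht
    have := hmapperm.mem_iff.mp (hselsub.subset ht)
    exact (PySem.List.mem_dedup colVals t).mp this
  -- A's loop result
  set ys := (PySem.List.dedup colVals).filter (fun t => sel.contains t) with hys
  have hA : colVals.foldl (fun tokens t =>
      if sel.contains t && !(tokens.contains t) then tokens ++ [t] else tokens) [] = ys := by
    rw [loopA_eq sel colVals []]
    rw [List.nil_append, hys]
    apply List.filter_congr
    intro u _
    simp
  rw [hA]
  -- B's key is the first-occurrence index on colVals
  have hkey : ∀ t ∈ colVals, firstD.getD t 0 = (colVals.idxOf t : Int) := by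
    intro t ht
    rw [PySem.Dict.getD_eq_get?_getD, hfirst,
      first_idx t colVals 0 PySem.Dict.empty rfl ht]
    simp
  -- ys is a permutation of selKeys
  have hysnodup : ys.Nodup := (PySem.List.nodup_dedup colVals).filter _
  have hysmem : ∀ t, t ∈ ys ↔ t ∈ selKeys := by
    intro t
    rw [hys, List.mem_filter]
    constructor
    · rintro ⟨-, h2⟩; exact (hmemsel t).mp (by simpa using h2)
    · intro h
      refine ⟨(PySem.List.mem_dedup colVals t).mpr (hselmem t h), by simpa using (hmemsel t).mpr h⟩
  have hperm : ys.Perm selKeys :=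
    (hysnodup.subperm (fun t ht => (hysmem t).mp ht)).antisymm
      (hselnodup.subperm (fun t ht => (hysmem t).mpr ht))
  -- ys is strictly increasing under B's key
  have hpw : ys.Pairwise (fun a b => firstD.getD a 0 < firstD.getD b 0) := by
    have hsubf : ys.Sublist (PySem.List.dedup colVals) := by
      rw [hys]; exact List.filter_sublist (l := PySem.List.dedup colVals)
    have hp := (dedup_pairwise_idxOf colVals).sublist hsubf
    apply hp.imp_of_mem
    intro a b ha hb hlt
    have hac : a ∈ colVals := (PySem.List.mem_dedup colVals a).mp (hsubf.subset ha)
    have hbc : b ∈ colVals := (PySem.List.mem_dedup colVals b).mp (hsubf.subset hb)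
    rw [hkey a hac, hkey b hbc]
    exact_mod_cast hlt
  exact (PySem.List.sorted_eq_of_perm_of_pairwise_lt selKeys ys _ hperm hpw).symm
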